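-- pv_equiv track=rewrite | github.com/kqwtsk/1400-tasks-programming | Chapter 7/7.181.py | can_chain
-- ===== SOURCE A (Python) =====
-- def can_chain(dominoes):
--     # домино представлены числами 0..66, например 24 -> (2,4)
--     # строим неориентированный граф с вершинами 0..6
--     from collections import defaultdict, deque
--     deg = [0]*7
--     adj = defaultdict(list)
--     for v in dominoes:
--         a = v // 10
--         b = v % 10
--         if not (0 <= a <= 6 and 0 <= b <= 6):
--             continue
--         deg[a] += 1
--         deg[b] += 1
--         adj[a].append(b)
--         adj[b].append(a)
--     # найдём любую вершину с ненулевой степенью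
--     start = None
--     for i in range(7):
--         if deg[i] > 0:
--             start = i
--             break
--     if start is None:
--         return True  # нет костей — тривиальная цепочка
--     # проверка связности
--     visited = [False]*7
--     q = deque([start])
--     visited[start] = True
--     while q:
--         u = q.popleft()
--         for v in adj[u]:
--             if not visited[v]:
--                 visited[v] = True
--                 q.append(v)
--     for i in range(7):
--         if deg[i] > 0 and not visited[i]:
--             return False
--     # условие Эйлерова пути: 0 или 2 вершины нечётной степени
--     odd = sum(1 for d in deg if d % 2 == 1)
--     return odd in (0, 2)
-- ===== SOURCE B (Python) =====
-- def can_chain(dominoes):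
--     # one pass: accumulate degrees and merge connected components by label
--     # relabeling (no adjacency lists, no BFS queue)
--     deg = [0] * 7
--     comp = list(range(7))
--     for v in dominoes:
--         a = v // 10
--         b = v % 10
--         if 0 <= a <= 6 and 0 <= b <= 6:
--             deg[a] += 1
--             deg[b] += 1
--             x, y = comp[a], comp[b]
--             if x != y:
--                 comp = [x if c == y else c for c in comp]
--     labels = {comp[i] for i in range(7) if deg[i] > 0}
--     odd = sum(d % 2 for d in deg)
--     return len(labels) <= 1 and odd in (0, 2)
-- ===== Notes on version B (the rewrite author's own statement) =====
-- stated objective: alternative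
-- what changed: Replaces A's adjacency-list + BFS-queue connectivity check by a single pass that merges component labels (union-by-relabel over the 7 fixed vertices) while counting degrees, then just compares labels of positive-degree vertices; no adjacency dict, no queue.
import Mathlib
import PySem

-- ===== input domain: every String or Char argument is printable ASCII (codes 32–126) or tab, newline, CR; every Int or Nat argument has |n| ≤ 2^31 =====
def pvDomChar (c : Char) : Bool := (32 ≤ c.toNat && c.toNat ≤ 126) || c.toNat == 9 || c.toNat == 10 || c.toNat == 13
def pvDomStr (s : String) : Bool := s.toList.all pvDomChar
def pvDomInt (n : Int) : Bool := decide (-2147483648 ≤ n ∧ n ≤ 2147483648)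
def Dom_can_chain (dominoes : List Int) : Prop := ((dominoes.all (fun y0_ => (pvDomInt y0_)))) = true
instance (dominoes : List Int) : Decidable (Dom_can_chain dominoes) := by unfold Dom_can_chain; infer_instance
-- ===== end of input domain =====

-- B replaces A's adjacency-dict + BFS connectivity check by a one-pass merge of
-- component labels over the 7 fixed vertices (alternative algorithm, same cost).


-- ===== PORT A =====
-- the body of A's first for-loop (degree counting + adjacency lists)
def can_chain_stepA (st : List Int × PySem.Dict Int (List Int)) (v : Int) :
    List Int × PySem.Dict Int (List Int) :=
  let a := PySem.Int.floordiv v 10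
  let b := PySem.Int.mod v 10
  if 0 ≤ a ∧ a ≤ 6 ∧ 0 ≤ b ∧ b ≤ 6 then
    let deg1 := PySem.List.pySetD st.1 a (PySem.List.pyGetD st.1 a 0 + 1)
    let deg2 := PySem.List.pySetD deg1 b (PySem.List.pyGetD deg1 b 0 + 1)
    let adj1 := st.2.modify a [] (fun l => l ++ [b])
    let adj2 := adj1.modify b [] (fun l => l ++ [a])
    (deg2, adj2)
  else st

-- 'if not visited[v]: visited[v] = True; q.append(v)'.  The range test is a totality
-- guard only: in A the queue/adjacency vertices are always 0..6, where it is exact.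
def can_chain_bfsStep (st : List Bool × List Int) (v : Int) : List Bool × List Int :=
  if 0 ≤ v ∧ v < (st.1.length : Int) ∧ PySem.List.pyGetD st.1 v false = false then
    (PySem.List.pySetD st.1 v true, st.2 ++ [v])
  else st

-- termination helpers for the BFS while-loop (cited by decreasing_by below)
lemma can_chain_count_set (l : List Bool) (i : Nat) (h : i < l.length) (hf : l[i] = false) :
    (l.set i true).count false + 1 = l.count false := by
  induction l generalizing i with
  | nil => simp at h
  | cons x t ih =>
    cases i with
    | zero => simp at hf; subst hf; simp
    | succ n =>
      simp only [List.set_cons_succ, List.count_cons]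
      have := ih n (by simpa using h) (by simpa using hf)
      omega

lemma can_chain_bfs_measure (nbrs : List Int) (st : List Bool × List Int) :
    2 * (nbrs.foldl can_chain_bfsStep st).1.count false + (nbrs.foldl can_chain_bfsStep st).2.length
      ≤ 2 * st.1.count false + st.2.length := by
  induction nbrs generalizing st with
  | nil => simp
  | cons v rest ih =>
    simp only [List.foldl_cons]
    refine le_trans (ih _) ?_
    unfold can_chain_bfsStep
    split
    · rename_i h
      obtain ⟨h0, hlt, hf⟩ := h
      rw [PySem.List.pySetD_of_nonneg _ _ h0]
      rw [PySem.List.pyGetD_eq_getElem _ _ h0 (by simpa using hlt)] at hf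
      have := can_chain_count_set st.1 v.toNat (by omega) hf
      simp only [List.length_append, List.length_cons, List.length_nil]
      omega
    · simp

-- the 'while q:' BFS loop of A
def can_chain_bfs (adj : PySem.Dict Int (List Int)) (visited : List Bool) (q : List Int) :
    List Bool :=
  match q with
  | [] => visited
  | u :: qt =>
    let st := (adj.getD u []).foldl can_chain_bfsStep (visited, qt)
    can_chain_bfs adj st.1 st.2
termination_by 2 * visited.count false + q.length
decreasing_by
  have h := can_chain_bfs_measure (adj.getD u []) (visited, qt)
  simp only [List.length_cons] at *
  omega

def can_chain (dominoes : List Int) : Bool :=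
  let st := dominoes.foldl can_chain_stepA (PySem.List.pyRepeat [0] 7, PySem.Dict.empty)
  let deg := st.1
  let adj := st.2
  match (PySem.List.pyRange 0 7 1).find? (fun i => decide (0 < PySem.List.pyGetD deg i 0)) with
  | none => true
  | some start =>
      let visited :=
        can_chain_bfs adj (PySem.List.pySetD (PySem.List.pyRepeat [false] 7) start true) [start]
      if (PySem.List.pyRange 0 7 1).any (fun i =>
            decide (0 < PySem.List.pyGetD deg i 0) && !(PySem.List.pyGetD visited i false)) then
        false
      else
        let odd := (deg.map (fun d => if PySem.Int.mod d 2 = 1 then (1 : Int) else 0)).sum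
        decide (odd = 0 ∨ odd = 2)

-- ===== PORT B =====
-- the body of B's single for-loop (degree counting + component-label merging)
def can_chain_altStep (st : List Int × List Int) (v : Int) : List Int × List Int :=
  let a := PySem.Int.floordiv v 10
  let b := PySem.Int.mod v 10
  if 0 ≤ a ∧ a ≤ 6 ∧ 0 ≤ b ∧ b ≤ 6 then
    let deg1 := PySem.List.pySetD st.1 a (PySem.List.pyGetD st.1 a 0 + 1)
    let deg2 := PySem.List.pySetD deg1 b (PySem.List.pyGetD deg1 b 0 + 1)
    let x := PySem.List.pyGetD st.2 a 0
    let y := PySem.List.pyGetD st.2 b 0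
    let comp := if x ≠ y then st.2.map (fun c => if c = y then x else c) else st.2
    (deg2, comp)
  else st

def can_chain_alt (dominoes : List Int) : Bool :=
  let st := dominoes.foldl can_chain_altStep (PySem.List.pyRepeat [0] 7, PySem.List.pyRange 0 7 1)
  let deg := st.1
  let comp := st.2
  let labels := (PySem.List.pyRange 0 7 1).foldl
      (fun s i => if 0 < PySem.List.pyGetD deg i 0 then PySem.Set.add s (PySem.List.pyGetD comp i 0) else s)
      PySem.Set.empty
  let odd := (deg.map (fun d => PySem.Int.mod d 2)).sum
  decide (labels.length ≤ 1) && decide (odd = 0 ∨ odd = 2)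

-- ===== PRECONDITION & SPEC =====
def Spec_can_chain (dominoes : List Int) (out : Bool) : Prop := out = can_chain_alt dominoes
instance (dominoes : List Int) (out : Bool) : Decidable (Spec_can_chain dominoes out) := by unfold Spec_can_chain; infer_instance

-- ===== CLAIM (what is proved, stated in full; the proofs are below) =====
def Claim_equal_can_chain : Prop := ∀ (dominoes : List Int), Dom_can_chain dominoes → Spec_can_chain dominoes (can_chain dominoes)

-- ===== LEMMAS AND PROOFS =====

-- the valid edge extracted from one domino value, and the list of all valid edges
def pvEdge (v : Int) : Option (Int × Int) :=
  let a := PySem.Int.floordiv v 10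
  let b := PySem.Int.mod v 10
  if 0 ≤ a ∧ a ≤ 6 ∧ 0 ≤ b ∧ b ≤ 6 then some (a, b) else none

def pvEdges (ds : List Int) : List (Int × Int) := ds.filterMap pvEdge

def pvDegStep (deg : List Int) (e : Int × Int) : List Int :=
  let deg1 := PySem.List.pySetD deg e.1 (PySem.List.pyGetD deg e.1 0 + 1)
  PySem.List.pySetD deg1 e.2 (PySem.List.pyGetD deg1 e.2 0 + 1)

def pvAdjStep (adj : PySem.Dict Int (List Int)) (e : Int × Int) : PySem.Dict Int (List Int) :=
  (adj.modify e.1 [] (fun l => l ++ [e.2])).modify e.2 [] (fun l => l ++ [e.1])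

def pvCompStep (comp : List Int) (e : Int × Int) : List Int :=
  let x := PySem.List.pyGetD comp e.1 0
  let y := PySem.List.pyGetD comp e.2 0
  if x ≠ y then comp.map (fun c => if c = y then x else c) else comp

def pvDeg (E : List (Int × Int)) : List Int := E.foldl pvDegStep (PySem.List.pyRepeat [0] 7)
def pvAdj (E : List (Int × Int)) : PySem.Dict Int (List Int) := E.foldl pvAdjStep PySem.Dict.empty
def pvComp (E : List (Int × Int)) : List Int := E.foldl pvCompStep (PySem.List.pyRange 0 7 1)

def pvR (E : List (Int × Int)) (i j : Int) : Prop := (i, j) ∈ E ∨ (j, i) ∈ E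
def pvG (E : List (Int × Int)) : Int → Int → Prop := Relation.EqvGen (pvR E)
def pvWF (E : List (Int × Int)) : Prop := ∀ e ∈ E, 0 ≤ e.1 ∧ e.1 < 7 ∧ 0 ≤ e.2 ∧ e.2 < 7

def pvVis (vis : List Bool) (v : Int) : Prop :=
  0 ≤ v ∧ v < (vis.length : Int) ∧ PySem.List.pyGetD vis v false = true

-- ---- decomposition of the two passes ----
lemma pv_stepA_eq (st : List Int × PySem.Dict Int (List Int)) (v : Int) :
    can_chain_stepA st v =
      match pvEdge v with
      | some e => (pvDegStep st.1 e, pvAdjStep st.2 e)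
      | none => st := by
  show (if _ then _ else _) = _
  unfold pvEdge pvDegStep pvAdjStep
  split
  · rename_i h; rw [if_pos h]
  · rename_i h; rw [if_neg h]

lemma pv_stepB_eq (st : List Int × List Int) (v : Int) :
    can_chain_altStep st v =
      match pvEdge v with
      | some e => (pvDegStep st.1 e, pvCompStep st.2 e)
      | none => st := by
  show (if _ then _ else _) = _
  unfold pvEdge pvDegStep pvCompStep
  split
  · rename_i h; rw [if_pos h]
  · rename_i h; rw [if_neg h]

lemma pv_foldl_edges {σ : Type} (g : σ → (Int × Int) → σ) (f : σ → Int → σ)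
    (hf : ∀ s v, f s v = match pvEdge v with | some e => g s e | none => s)
    (ds : List Int) (init : σ) :
    ds.foldl f init = (pvEdges ds).foldl g init := by
  induction ds generalizing init with
  | nil => simp [pvEdges]
  | cons v rest ih =>
    simp only [List.foldl_cons, pvEdges, List.filterMap_cons]
    rw [hf]
    cases h : pvEdge v <;> exact ih _

lemma pv_foldA (ds : List Int) :
    ds.foldl can_chain_stepA (PySem.List.pyRepeat [0] 7, PySem.Dict.empty)
      = (pvDeg (pvEdges ds), pvAdj (pvEdges ds)) := by
  rw [pv_foldl_edges (fun st e => (pvDegStep st.1 e, pvAdjStep st.2 e)) _ pv_stepA_eq]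
  exact PySem.List.foldl_prod_mk pvDegStep pvAdjStep _ _ _

lemma pv_foldB (ds : List Int) :
    ds.foldl can_chain_altStep (PySem.List.pyRepeat [0] 7, PySem.List.pyRange 0 7 1)
      = (pvDeg (pvEdges ds), pvComp (pvEdges ds)) := by
  rw [pv_foldl_edges (fun st e => (pvDegStep st.1 e, pvCompStep st.2 e)) _ pv_stepB_eq]
  exact PySem.List.foldl_prod_mk pvDegStep pvCompStep _ _ _

lemma pv_wf_edges (ds : List Int) : pvWF (pvEdges ds) := by
  intro e he
  simp only [pvEdges, List.mem_filterMap] at he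
  obtain ⟨v, _, hev⟩ := he
  by_cases h : 0 ≤ PySem.Int.floordiv v 10 ∧ PySem.Int.floordiv v 10 ≤ 6 ∧
      0 ≤ PySem.Int.mod v 10 ∧ PySem.Int.mod v 10 ≤ 6
  · simp only [pvEdge] at hev
    rw [if_pos h] at hev
    injection hev with h2
    subst h2
    simp only
    omega
  · simp only [pvEdge] at hev
    rw [if_neg h] at hev
    cases hev

-- ---- degree facts ----
lemma pv_degStep_inv (deg : List Int) (e : Int × Int)
    (hb : 0 ≤ e.1 ∧ e.1 < 7 ∧ 0 ≤ e.2 ∧ e.2 < 7)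
    (hl : deg.length = 7) (hn : ∀ d ∈ deg, 0 ≤ d) :
    (pvDegStep deg e).length = 7 ∧ ∀ d ∈ pvDegStep deg e, 0 ≤ d := by
  obtain ⟨h1, h2, h3, h4⟩ := hb
  unfold pvDegStep
  rw [PySem.List.pySetD_of_nonneg _ _ h1]
  have hl1 : (deg.set e.1.toNat (PySem.List.pyGetD deg e.1 0 + 1)).length = 7 := by
    simpa using hl
  rw [PySem.List.pySetD_of_nonneg _ _ h3]
  constructor
  · simpa using hl1
  · intro d hd
    have hg1 : 0 ≤ PySem.List.pyGetD deg e.1 0 := by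
      rw [PySem.List.pyGetD_eq_getElem _ _ h1 (by omega)]
      exact hn _ (List.getElem_mem _)
    have hg2 : 0 ≤ PySem.List.pyGetD (deg.set e.1.toNat (PySem.List.pyGetD deg e.1 0 + 1)) e.2 0 := by
      rw [PySem.List.pyGetD_eq_getElem _ _ h3 (by omega)]
      rcases List.mem_or_eq_of_mem_set (List.getElem_mem _) with h | h
      · exact hn _ h
      · omega
    rcases List.mem_or_eq_of_mem_set hd with h | h
    · rcases List.mem_or_eq_of_mem_set h with h' | h'
      · exact hn _ h'
      · omega
    · omega

lemma pv_deg_inv (E : List (Int × Int)) (hWF : pvWF E) :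
    (pvDeg E).length = 7 ∧ ∀ d ∈ pvDeg E, 0 ≤ d := by
  unfold pvDeg
  have : ∀ deg : List Int, deg.length = 7 → (∀ d ∈ deg, 0 ≤ d) →
      (E.foldl pvDegStep deg).length = 7 ∧ ∀ d ∈ E.foldl pvDegStep deg, 0 ≤ d := by
    induction E with
    | nil => intro deg h1 h2; exact ⟨h1, h2⟩
    | cons e rest ih =>
      intro deg h1 h2
      have hb := hWF e (List.mem_cons_self)
      have hstep := pv_degStep_inv deg e hb h1 h2
      exact (ih (fun e' he' => hWF e' (List.mem_cons_of_mem _ he')) _ hstep.1 hstep.2)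
  refine this _ ?_ ?_ <;> simp [PySem.List.pyRepeat_singleton]

-- ---- the equivalence closure of an edge list ----
lemma pvE_trans {α : Type} {r : α → α → Prop} {x y z : α}
    (h1 : Relation.EqvGen r x y) (h2 : Relation.EqvGen r y z) : Relation.EqvGen r x z :=
  Relation.EqvGen.trans _ _ _ h1 h2

lemma pvE_symm {α : Type} {r : α → α → Prop} {x y : α}
    (h : Relation.EqvGen r x y) : Relation.EqvGen r y x :=
  Relation.EqvGen.symm _ _ h

lemma pvG_nil (i j : Int) : pvG [] i j ↔ i = j := by
  constructor
  · intro h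
    induction h with
    | rel x y hxy => simp [pvR] at hxy
    | refl x => rfl
    | symm x y _ ih => exact ih.symm
    | trans x y z _ _ ih1 ih2 => exact ih1.trans ih2
  · rintro rfl; exact Relation.EqvGen.refl i

lemma pv_eqvGen_pair {α : Type} (r : α → α → Prop) (a b : α) (i j : α) :
    Relation.EqvGen (fun x y => r x y ∨ (x = a ∧ y = b) ∨ (x = b ∧ y = a)) i j ↔
      Relation.EqvGen r i j ∨
        (Relation.EqvGen r i a ∧ Relation.EqvGen r b j) ∨
        (Relation.EqvGen r i b ∧ Relation.EqvGen r a j) := by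
  constructor
  · intro h
    induction h with
    | rel x y hxy =>
      rcases hxy with h | ⟨rfl, rfl⟩ | ⟨rfl, rfl⟩
      · exact Or.inl (Relation.EqvGen.rel _ _ h)
      · exact Or.inr (Or.inl ⟨Relation.EqvGen.refl _, Relation.EqvGen.refl _⟩)
      · exact Or.inr (Or.inr ⟨Relation.EqvGen.refl _, Relation.EqvGen.refl _⟩)
    | refl x => exact Or.inl (Relation.EqvGen.refl x)
    | symm x y _ ih =>
      rcases ih with h | ⟨h1, h2⟩ | ⟨h1, h2⟩
      · exact Or.inl (pvE_symm h)
      · exact Or.inr (Or.inr ⟨pvE_symm h2, pvE_symm h1⟩)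
      · exact Or.inr (Or.inl ⟨pvE_symm h2, pvE_symm h1⟩)
    | trans x y z _ _ ih1 ih2 =>
      rcases ih1 with h | ⟨h1, h2⟩ | ⟨h1, h2⟩ <;> rcases ih2 with g | ⟨g1, g2⟩ | ⟨g1, g2⟩
      · exact Or.inl (pvE_trans h g)
      · exact Or.inr (Or.inl ⟨pvE_trans h g1, g2⟩)
      · exact Or.inr (Or.inr ⟨pvE_trans h g1, g2⟩)
      · exact Or.inr (Or.inl ⟨h1, pvE_trans h2 g⟩)
      · exact Or.inr (Or.inl ⟨h1, g2⟩)
      · exact Or.inl (pvE_trans h1 g2)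
      · exact Or.inr (Or.inr ⟨h1, pvE_trans h2 g⟩)
      · exact Or.inl (pvE_trans h1 g2)
      · exact Or.inr (Or.inr ⟨h1, g2⟩)
  · have lift : ∀ {p q : α}, Relation.EqvGen r p q →
        Relation.EqvGen (fun x y => r x y ∨ (x = a ∧ y = b) ∨ (x = b ∧ y = a)) p q :=
      fun h => h.mono (fun _ _ hr => Or.inl hr)
    have hab : Relation.EqvGen (fun x y => r x y ∨ (x = a ∧ y = b) ∨ (x = b ∧ y = a)) a b :=
      Relation.EqvGen.rel _ _ (Or.inr (Or.inl ⟨rfl, rfl⟩))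
    rintro (h | ⟨h1, h2⟩ | ⟨h1, h2⟩)
    · exact lift h
    · exact pvE_trans (lift h1) (pvE_trans hab (lift h2))
    · exact pvE_trans (lift h1) (pvE_trans (pvE_symm hab) (lift h2))

lemma pvG_snoc (E : List (Int × Int)) (a b i j : Int) :
    pvG (E ++ [(a, b)]) i j ↔
      pvG E i j ∨ (pvG E i a ∧ pvG E b j) ∨ (pvG E i b ∧ pvG E a j) := by
  have hrel : ∀ x y, pvR (E ++ [(a, b)]) x y ↔
      (pvR E x y ∨ (x = a ∧ y = b) ∨ (x = b ∧ y = a)) := by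
    intro x y
    simp only [pvR, List.mem_append, List.mem_singleton, Prod.mk.injEq]
    tauto
  constructor
  · intro h
    exact (pv_eqvGen_pair (pvR E) a b i j).mp (h.mono (fun x y hxy => (hrel x y).mp hxy))
  · intro h
    exact ((pv_eqvGen_pair (pvR E) a b i j).mpr h).mono (fun x y hxy => (hrel x y).mpr hxy)

-- ---- characterisation of B's component labels ----
lemma pv_comp_spec (E : List (Int × Int)) (hWF : pvWF E) :
    (pvComp E).length = 7 ∧
      ∀ i j : Int, 0 ≤ i → i < 7 → 0 ≤ j → j < 7 →
        (PySem.List.pyGetD (pvComp E) i 0 = PySem.List.pyGetD (pvComp E) j 0 ↔ pvG E i j) := by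
  revert hWF
  induction E using List.reverseRecOn with
  | nil =>
    intro _
    refine ⟨by decide, ?_⟩
    intro i j hi0 hi7 hj0 hj7
    rw [pvG_nil]
    have hval : ∀ k : Int, 0 ≤ k → k < 7 → PySem.List.pyGetD (pvComp []) k 0 = k := by
      intro k h0 h7
      show PySem.List.pyGetD (PySem.List.pyRange 0 7 1) k 0 = k
      interval_cases k <;> decide
    rw [hval i hi0 hi7, hval j hj0 hj7]
  | append_singleton E e ih =>
    intro hWF
    obtain ⟨a, b⟩ := e
    have hWFE : pvWF E := fun e' he' => hWF e' (List.mem_append_left _ he')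
    obtain ⟨ihl, ihk⟩ := ih hWFE
    have hb := hWF (a, b) (List.mem_append_right _ (List.mem_singleton_self _))
    dsimp only at hb
    obtain ⟨ha0, ha7, hb0, hb7⟩ := hb
    have hcomp : pvComp (E ++ [(a, b)]) = pvCompStep (pvComp E) (a, b) := by
      unfold pvComp; rw [List.foldl_append]; rfl
    have hget : ∀ (k : Int), 0 ≤ k → k < 7 → ∀ (f : Int → Int),
        PySem.List.pyGetD ((pvComp E).map f) k 0 = f (PySem.List.pyGetD (pvComp E) k 0) := by
      intro k h0 h7 f
      rw [PySem.List.pyGetD_eq_getElem _ _ h0 (by rw [List.length_map, ihl]; exact_mod_cast h7),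
          PySem.List.pyGetD_eq_getElem _ _ h0 (by rw [ihl]; exact_mod_cast h7)]
      simp
    rw [hcomp]
    unfold pvCompStep
    dsimp only
    constructor
    · split
      · rw [List.length_map]; exact ihl
      · exact ihl
    · intro i j hi0 hi7 hj0 hj7
      rw [pvG_snoc]
      by_cases hxy : PySem.List.pyGetD (pvComp E) a 0 = PySem.List.pyGetD (pvComp E) b 0
      · rw [if_neg (fun hne => hne hxy)]
        have hGab : pvG E a b := (ihk a b ha0 ha7 hb0 hb7).mp hxy
        rw [ihk i j hi0 hi7 hj0 hj7]
        constructor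
        · exact Or.inl
        · rintro (h | ⟨h1, h2⟩ | ⟨h1, h2⟩)
          · exact h
          · exact pvE_trans h1 (pvE_trans hGab h2)
          · exact pvE_trans h1 (pvE_trans (pvE_symm hGab) h2)
      · rw [if_pos hxy]
        rw [hget i hi0 hi7, hget j hj0 hj7]
        by_cases h1 : PySem.List.pyGetD (pvComp E) i 0 = PySem.List.pyGetD (pvComp E) b 0 <;>
          by_cases h2 : PySem.List.pyGetD (pvComp E) j 0 = PySem.List.pyGetD (pvComp E) b 0
        · rw [if_pos h1, if_pos h2]
          have hGij : pvG E i j :=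
            pvE_trans ((ihk i b hi0 hi7 hb0 hb7).mp h1)
              (pvE_symm ((ihk j b hj0 hj7 hb0 hb7).mp h2))
          exact ⟨fun _ => Or.inl hGij, fun _ => rfl⟩
        · rw [if_pos h1, if_neg h2]
          have hGib : pvG E i b := (ihk i b hi0 hi7 hb0 hb7).mp h1
          constructor
          · intro hx
            exact Or.inr (Or.inr ⟨hGib, pvE_symm ((ihk j a hj0 hj7 ha0 ha7).mp hx.symm)⟩)
          · rintro (h | ⟨ha1, ha2⟩ | ⟨ha1, ha2⟩)
            · exact absurd ((ihk j b hj0 hj7 hb0 hb7).mpr (pvE_trans (pvE_symm h) hGib)) h2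
            · exact absurd ((ihk j b hj0 hj7 hb0 hb7).mpr (pvE_symm ha2)) h2
            · exact ((ihk j a hj0 hj7 ha0 ha7).mpr (pvE_symm ha2)).symm
        · rw [if_neg h1, if_pos h2]
          have hGjb : pvG E j b := (ihk j b hj0 hj7 hb0 hb7).mp h2
          constructor
          · intro hx
            exact Or.inr (Or.inl ⟨(ihk i a hi0 hi7 ha0 ha7).mp hx, pvE_symm hGjb⟩)
          · rintro (h | ⟨ha1, ha2⟩ | ⟨ha1, ha2⟩)
            · exact absurd ((ihk i b hi0 hi7 hb0 hb7).mpr (pvE_trans h hGjb)) h1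
            · exact (ihk i a hi0 hi7 ha0 ha7).mpr ha1
            · exact absurd ((ihk i b hi0 hi7 hb0 hb7).mpr ha1) h1
        · rw [if_neg h1, if_neg h2]
          rw [ihk i j hi0 hi7 hj0 hj7]
          constructor
          · exact Or.inl
          · rintro (h | ⟨ha1, ha2⟩ | ⟨ha1, ha2⟩)
            · exact h
            · exact absurd ((ihk j b hj0 hj7 hb0 hb7).mpr (pvE_symm ha2)) h2
            · exact absurd ((ihk i b hi0 hi7 hb0 hb7).mpr ha1) h1

-- ---- characterisation of A's adjacency dict ----
lemma pv_adj_spec (E : List (Int × Int)) (i j : Int) :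
    j ∈ (pvAdj E).getD i [] ↔ pvR E i j := by
  induction E using List.reverseRecOn generalizing i j with
  | nil => simp [pvAdj, pvR, PySem.Dict.getD_empty]
  | append_singleton E e ih =>
    obtain ⟨a, b⟩ := e
    have hcomp : pvAdj (E ++ [(a, b)]) = pvAdjStep (pvAdj E) (a, b) := by
      unfold pvAdj; rw [List.foldl_append]; rfl
    have hR : pvR (E ++ [(a, b)]) i j ↔ (pvR E i j ∨ (i = a ∧ j = b) ∨ (i = b ∧ j = a)) := by
      simp only [pvR, List.mem_append, List.mem_singleton, Prod.mk.injEq]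
      tauto
    rw [hcomp, hR]
    unfold pvAdjStep
    dsimp only
    rw [PySem.Dict.getD_modify, PySem.Dict.getD_modify, PySem.Dict.getD_modify]
    split_ifs with h1 h2 h3
    · subst h2; subst h1
      simp only [List.mem_append, List.mem_singleton, ih]
      tauto
    · subst h1
      simp only [List.mem_append, List.mem_singleton, ih]
      tauto
    · subst h3
      simp only [List.mem_append, List.mem_singleton, ih]
      tauto
    · simp only [ih]
      constructor
      · exact Or.inl
      · rintro (h | ⟨hia, _⟩ | ⟨hib, _⟩)
        · exact h
        · exact absurd hia h3
        · exact absurd hib h1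

-- ---- BFS lemmas ----
lemma pv_vis_set_iff (vis : List Bool) (v w : Int) (hv0 : 0 ≤ v) (hvl : v < (vis.length : Int)) :
    pvVis (vis.set v.toNat true) w ↔ (pvVis vis w ∨ w = v) := by
  unfold pvVis
  simp only [List.length_set]
  constructor
  · rintro ⟨h0, hl, hval⟩
    by_cases he : w.toNat = v.toNat
    · right; omega
    · left
      refine ⟨h0, hl, ?_⟩
      rw [PySem.List.pyGetD_eq_getElem _ _ h0 (by simpa using hl)] at hval
      rw [PySem.List.pyGetD_eq_getElem _ _ h0 (by simpa using hl)]
      rwa [List.getElem_set, if_neg (fun hh => he hh.symm)] at hval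
  · rintro (⟨h0, hl, hval⟩ | rfl)
    · refine ⟨h0, hl, ?_⟩
      rw [PySem.List.pyGetD_eq_getElem _ _ h0 (by simpa using hl)] at hval
      rw [PySem.List.pyGetD_eq_getElem _ _ h0 (by simpa using hl)]
      rw [List.getElem_set]
      split <;> [rfl; exact hval]
    · refine ⟨hv0, hvl, ?_⟩
      rw [PySem.List.pyGetD_eq_getElem _ _ hv0 (by simpa using hvl)]
      rw [List.getElem_set, if_pos rfl]

lemma pv_step_dichotomy (st : List Bool × List Int) (v : Int) :
    can_chain_bfsStep st v = st ∨
      (0 ≤ v ∧ v < (st.1.length : Int) ∧ PySem.List.pyGetD st.1 v false = false ∧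
        can_chain_bfsStep st v = (st.1.set v.toNat true, st.2 ++ [v])) := by
  unfold can_chain_bfsStep
  split
  · rename_i h
    right
    exact ⟨h.1, h.2.1, h.2.2, by rw [PySem.List.pySetD_of_nonneg _ _ h.1]⟩
  · left; rfl

lemma pv_step_len (st : List Bool × List Int) (v : Int) :
    (can_chain_bfsStep st v).1.length = st.1.length := by
  rcases pv_step_dichotomy st v with h | ⟨_, _, _, h⟩
  · rw [h]
  · rw [h]
    simp

lemma pv_step_mono (st : List Bool × List Int) (v w : Int) (h : pvVis st.1 w) :
    pvVis (can_chain_bfsStep st v).1 w := by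
  rcases pv_step_dichotomy st v with he | ⟨h0, hl, _, he⟩ <;> rw [he]
  · exact h
  · exact (pv_vis_set_iff st.1 v w h0 hl).mpr (Or.inl h)

lemma pv_step_q_sub (st : List Bool × List Int) (v : Int) :
    st.2 ⊆ (can_chain_bfsStep st v).2 := by
  rcases pv_step_dichotomy st v with he | ⟨_, _, _, he⟩ <;> rw [he]
  · exact fun _ h => h
  · exact fun _ h => List.mem_append_left _ h

lemma pv_step_vis_cases (st : List Bool × List Int) (v w : Int)
    (h : pvVis (can_chain_bfsStep st v).1 w) : pvVis st.1 w ∨ w = v := by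
  rcases pv_step_dichotomy st v with he | ⟨h0, hl, _, he⟩ <;> rw [he] at h
  · exact Or.inl h
  · exact (pv_vis_set_iff st.1 v w h0 hl).mp h
lemma pv_fold_len (nbrs : List Int) (st : List Bool × List Int) :
    (nbrs.foldl can_chain_bfsStep st).1.length = st.1.length := by
  induction nbrs generalizing st with
  | nil => rfl
  | cons v rest ih => rw [List.foldl_cons, ih, pv_step_len]

lemma pv_fold_mono (nbrs : List Int) (st : List Bool × List Int) :
    (∀ v, pvVis st.1 v → pvVis (nbrs.foldl can_chain_bfsStep st).1 v) ∧
      st.2 ⊆ (nbrs.foldl can_chain_bfsStep st).2 := by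
  induction nbrs generalizing st with
  | nil => exact ⟨fun _ h => h, fun _ h => h⟩
  | cons v rest ih =>
    rw [List.foldl_cons]
    exact ⟨fun w hw => (ih _).1 w (pv_step_mono st v w hw),
      fun w hw => (ih _).2 ((pv_step_q_sub st v) hw)⟩

lemma pv_fold_marks (nbrs : List Int) (st : List Bool × List Int) :
    ∀ v ∈ nbrs, 0 ≤ v → v < (st.1.length : Int) →
      pvVis (nbrs.foldl can_chain_bfsStep st).1 v := by
  induction nbrs generalizing st with
  | nil => intro v hv; cases hv
  | cons u rest ih =>
    intro v hv h0 hl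
    rw [List.foldl_cons]
    rcases List.mem_cons.mp hv with rfl | hv'
    · -- v is processed now: it is marked by the step (or was already visited)
      refine (pv_fold_mono rest _).1 v ?_
      rcases pv_step_dichotomy st v with he | ⟨_, _, _, he⟩ <;> rw [he]
      · -- guard failed although v is in range: v was already visited
        unfold can_chain_bfsStep at he
        by_cases hvis : PySem.List.pyGetD st.1 v false = true
        · exact ⟨h0, hl, hvis⟩
        · have hfalse : PySem.List.pyGetD st.1 v false = false := by
            cases hb : PySem.List.pyGetD st.1 v false
            · rfl
            · exact absurd hb hvis
          rw [if_pos ⟨h0, hl, hfalse⟩] at he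
          -- the step equals st yet appends v to the queue: lengths force a contradiction
          have := congrArg (fun p => p.2.length) he
          simp at this
      · exact (pv_vis_set_iff st.1 v v h0 hl).mpr (Or.inr rfl)
    · exact ih _ v hv' h0 (by rwa [pv_step_len])

lemma pv_fold_new_mem (nbrs : List Int) (st : List Bool × List Int) :
    ∀ v, ¬ pvVis st.1 v → pvVis (nbrs.foldl can_chain_bfsStep st).1 v →
      v ∈ (nbrs.foldl can_chain_bfsStep st).2 := by
  induction nbrs generalizing st with
  | nil => intro v h1 h2; exact absurd h2 h1
  | cons u rest ih =>
    intro v h1 h2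
    rw [List.foldl_cons] at h2 ⊢
    by_cases hmid : pvVis (can_chain_bfsStep st u).1 v
    · rcases pv_step_vis_cases st u v hmid with h | rfl
      · exact absurd h h1
      · rcases pv_step_dichotomy st v with he | ⟨_, _, _, he⟩
        · rw [he] at hmid; exact absurd hmid h1
        · refine (pv_fold_mono rest _).2 ?_
          rw [he]
          exact List.mem_append_right _ (List.mem_singleton_self _)
    · exact ih _ v hmid h2

lemma pv_fold_vis_cases (nbrs : List Int) (st : List Bool × List Int) :
    ∀ v, pvVis (nbrs.foldl can_chain_bfsStep st).1 v → pvVis st.1 v ∨ v ∈ nbrs := by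
  induction nbrs generalizing st with
  | nil => exact fun v h => Or.inl h
  | cons u rest ih =>
    intro v h
    rw [List.foldl_cons] at h
    rcases ih _ v h with h' | h'
    · rcases pv_step_vis_cases st u v h' with h'' | rfl
      · exact Or.inl h''
      · exact Or.inr List.mem_cons_self
    · exact Or.inr (List.mem_cons_of_mem _ h')

lemma pv_fold_q_sub (nbrs : List Int) (st : List Bool × List Int) :
    ∀ v ∈ (nbrs.foldl can_chain_bfsStep st).2, v ∈ st.2 ∨ v ∈ nbrs := by
  induction nbrs generalizing st with
  | nil => exact fun v h => Or.inl h
  | cons u rest ih =>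
    intro v h
    rw [List.foldl_cons] at h
    rcases ih _ v h with h' | h'
    · rcases pv_step_dichotomy st u with he | ⟨_, _, _, he⟩ <;> rw [he] at h'
      · exact Or.inl h'
      · rcases List.mem_append.mp h' with h'' | h''
        · exact Or.inl h''
        · exact Or.inr (List.mem_cons.mpr (Or.inl (List.mem_singleton.mp h'')))
    · exact Or.inr (List.mem_cons_of_mem _ h')

lemma pv_fold_q_marked (nbrs : List Int) (st : List Bool × List Int)
    (h : ∀ v ∈ st.2, pvVis st.1 v) :
    ∀ v ∈ (nbrs.foldl can_chain_bfsStep st).2, pvVis (nbrs.foldl can_chain_bfsStep st).1 v := by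
  induction nbrs generalizing st with
  | nil => exact h
  | cons u rest ih =>
    rw [List.foldl_cons]
    refine ih _ ?_
    intro v hv
    rcases pv_step_dichotomy st u with he | ⟨h0, hl, _, he⟩ <;> rw [he] at hv ⊢
    · exact h v hv
    · rcases List.mem_append.mp hv with h'' | h''
      · exact (pv_vis_set_iff st.1 u v h0 hl).mpr (Or.inl (h v h''))
      · exact (pv_vis_set_iff st.1 u v h0 hl).mpr (Or.inr (List.mem_singleton.mp h''))

lemma pv_bfs_mono (adj : PySem.Dict Int (List Int)) (vis : List Bool) (q : List Int) :
    ∀ v, pvVis vis v → pvVis (can_chain_bfs adj vis q) v := by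
  refine can_chain_bfs.induct adj
    (fun vis q => ∀ v, pvVis vis v → pvVis (can_chain_bfs adj vis q) v) ?_ ?_ vis q
  · intro visited v hv
    rw [can_chain_bfs.eq_def]
    exact hv
  · intro visited u qt st ih v hv
    rw [can_chain_bfs.eq_def]
    exact ih v ((pv_fold_mono (adj.getD u []) (visited, qt)).1 v hv)

lemma pv_bfs_len (adj : PySem.Dict Int (List Int)) (vis : List Bool) (q : List Int) :
    (can_chain_bfs adj vis q).length = vis.length := by
  refine can_chain_bfs.induct adj
    (fun vis q => (can_chain_bfs adj vis q).length = vis.length) ?_ ?_ vis q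
  · intro visited
    rw [can_chain_bfs.eq_def]
  · intro visited u qt st ih
    rw [can_chain_bfs.eq_def]
    rw [ih, pv_fold_len]

lemma pv_bfs_sound (adj : PySem.Dict Int (List Int)) (R : Int → Prop)
    (hR : ∀ u v, R u → v ∈ adj.getD u [] → R v) :
    ∀ (vis : List Bool) (q : List Int),
      (∀ v ∈ q, R v) → (∀ v, pvVis vis v → R v) →
      ∀ v, pvVis (can_chain_bfs adj vis q) v → R v := by
  intro vis q
  refine can_chain_bfs.induct adj
    (fun vis q => (∀ v ∈ q, R v) → (∀ v, pvVis vis v → R v) →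
      ∀ v, pvVis (can_chain_bfs adj vis q) v → R v) ?_ ?_ vis q
  · intro visited _ hvis v hv
    rw [can_chain_bfs.eq_def] at hv
    exact hvis v hv
  · intro visited u qt st ih hq hvis v hv
    rw [can_chain_bfs.eq_def] at hv
    have hRu : R u := hq u List.mem_cons_self
    have hnb : ∀ w ∈ adj.getD u [], R w := fun w hw => hR u w hRu hw
    refine ih ?_ ?_ v hv
    · intro w hw
      rcases pv_fold_q_sub (adj.getD u []) (visited, qt) w hw with h' | h'
      · exact hq w (List.mem_cons_of_mem _ h')
      · exact hnb w h'
    · intro w hw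
      rcases pv_fold_vis_cases (adj.getD u []) (visited, qt) w hw with h' | h'
      · exact hvis w h'
      · exact hnb w h' 

lemma pv_bfs_closed (adj : PySem.Dict Int (List Int))
    (hrng : ∀ u v, v ∈ adj.getD u [] → 0 ≤ v ∧ v < 7) :
    ∀ (vis : List Bool) (q : List Int), vis.length = 7 →
      (∀ v ∈ q, pvVis vis v) →
      (∀ u, pvVis vis u → u ∈ q ∨ ∀ v ∈ adj.getD u [], pvVis vis v) →
      ∀ u, pvVis (can_chain_bfs adj vis q) u →
        ∀ v ∈ adj.getD u [], pvVis (can_chain_bfs adj vis q) v := by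
  intro vis q
  refine can_chain_bfs.induct adj
    (fun vis q => vis.length = 7 → (∀ v ∈ q, pvVis vis v) →
      (∀ u, pvVis vis u → u ∈ q ∨ ∀ v ∈ adj.getD u [], pvVis vis v) →
      ∀ u, pvVis (can_chain_bfs adj vis q) u →
        ∀ v ∈ adj.getD u [], pvVis (can_chain_bfs adj vis q) v) ?_ ?_ vis q
  · intro visited hlen hq hinv u hu v hv
    rw [can_chain_bfs.eq_def] at hu ⊢
    rcases hinv u hu with h | h
    · cases h
    · exact h v hv
  · intro visited u0 qt st ih hlen hq hinv u hu v hv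
    set nbrs := adj.getD u0 [] with hnbrs
    rw [can_chain_bfs.eq_def] at hu ⊢
    refine ih ?_ ?_ ?_ u hu v hv
    · rw [pv_fold_len]; exact hlen
    · exact pv_fold_q_marked nbrs (visited, qt)
        (fun w hw => hq w (List.mem_cons_of_mem _ hw))
    · intro w hw
      rcases pv_fold_vis_cases nbrs (visited, qt) w hw with hwv | hwn
      · rcases hinv w hwv with hmem | hcl
        · rcases List.mem_cons.mp hmem with rfl | hmem'
          · right
            intro x hx
            have hxr := hrng w x hx
            exact pv_fold_marks nbrs (visited, qt) x hx hxr.1 (by rw [hlen]; exact_mod_cast hxr.2)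
          · exact Or.inl ((pv_fold_mono nbrs (visited, qt)).2 hmem')
        · right
          intro x hx
          exact (pv_fold_mono nbrs (visited, qt)).1 x (hcl x hx)
      · by_cases hwv : pvVis visited w
        · rcases hinv w hwv with hmem | hcl
          · rcases List.mem_cons.mp hmem with rfl | hmem'
            · right
              intro x hx
              have hxr := hrng w x hx
              exact pv_fold_marks nbrs (visited, qt) x hx hxr.1 (by rw [hlen]; exact_mod_cast hxr.2)
            · exact Or.inl ((pv_fold_mono nbrs (visited, qt)).2 hmem')
          · right
            intro x hx
            exact (pv_fold_mono nbrs (visited, qt)).1 x (hcl x hx)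
        · exact Or.inl (pv_fold_new_mem nbrs (visited, qt) w hwv hw)

lemma pv_bfs_char (E : List (Int × Int)) (hWF : pvWF E) (s : Int) (hs0 : 0 ≤ s) (hs7 : s < 7) :
    ∀ i, pvVis (can_chain_bfs (pvAdj E)
        (PySem.List.pySetD (PySem.List.pyRepeat [false] 7) s true) [s]) i ↔ pvG E s i := by
  have hvis0 : PySem.List.pySetD (PySem.List.pyRepeat [false] 7) s true
      = (List.replicate 7 false).set s.toNat true := by
    rw [PySem.List.pyRepeat_singleton, PySem.List.pySetD_of_nonneg _ _ hs0]
    rfl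
  set vis0 := PySem.List.pySetD (PySem.List.pyRepeat [false] 7) s true with hv0
  have hlen0 : vis0.length = 7 := by rw [hvis0]; simp
  have hbase : ∀ v, ¬ pvVis (List.replicate 7 false) v := by
    intro v hv
    obtain ⟨h0, hl, hval⟩ := hv
    rw [PySem.List.pyGetD_eq_getElem _ _ h0 hl] at hval
    rw [List.getElem_replicate] at hval
    cases hval
  have hvis0_iff : ∀ v, pvVis vis0 v ↔ v = s := by
    intro v
    rw [hvis0]
    rw [pv_vis_set_iff _ s v hs0 (by simp; omega)]
    constructor
    · rintro (h | rfl)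
      · exact absurd h (hbase v)
      · rfl
    · rintro rfl; exact Or.inr rfl
  have hrng : ∀ u v : Int, v ∈ (pvAdj E).getD u [] → 0 ≤ v ∧ v < 7 := by
    intro u v hv
    rcases (pv_adj_spec E u v).mp hv with h | h
    · have := hWF _ h; exact ⟨this.2.2.1, this.2.2.2⟩
    · have := hWF _ h; exact ⟨this.1, this.2.1⟩
  set F := can_chain_bfs (pvAdj E) vis0 [s] with hF
  have hFs : pvVis F s :=
    pv_bfs_mono (pvAdj E) vis0 [s] s ((hvis0_iff s).mpr rfl)
  have hclosed : ∀ u, pvVis F u → ∀ v ∈ (pvAdj E).getD u [], pvVis F v := by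
    refine pv_bfs_closed (pvAdj E) hrng vis0 [s] hlen0 ?_ ?_
    · intro v hv
      rw [List.mem_singleton.mp hv]
      exact (hvis0_iff s).mpr rfl
    · intro u hu
      exact Or.inl (List.mem_singleton.mpr ((hvis0_iff u).mp hu))
  have hM : ∀ x y, pvG E x y → (pvVis F x ↔ pvVis F y) := by
    intro x y h
    induction h with
    | rel x y hxy =>
      have hyx : pvR E y x := Or.elim hxy Or.inr Or.inl
      constructor
      · intro hx; exact hclosed x hx y ((pv_adj_spec E x y).mpr hxy)
      · intro hy; exact hclosed y hy x ((pv_adj_spec E y x).mpr hyx)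
    | refl x => exact Iff.rfl
    | symm x y _ ih => exact ih.symm
    | trans x y z _ _ ih1 ih2 => exact ih1.trans ih2
  intro i
  constructor
  · intro hi
    refine pv_bfs_sound (pvAdj E) (pvG E s) ?_ vis0 [s] ?_ ?_ i hi
    · intro u v hu hv
      exact pvE_trans hu (Relation.EqvGen.rel _ _ ((pv_adj_spec E u v).mp hv))
    · intro v hv
      rw [List.mem_singleton.mp hv]
      exact Relation.EqvGen.refl s
    · intro v hv
      rw [(hvis0_iff v).mp hv]
      exact Relation.EqvGen.refl s
  · intro hG
    exact (hM s i hG).mp hFs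

-- ---- set-size lemma for B's label set ----
lemma pv_set_card_le_one (l : List Int) :
    (PySem.Set.ofList l).length ≤ 1 ↔ ∀ x ∈ l, ∀ y ∈ l, x = y := by
  have key : ∀ s : List Int, s.Nodup → (s.length ≤ 1 ↔ ∀ x ∈ s, ∀ y ∈ s, x = y) := by
    intro s hnd
    match s with
    | [] => simp
    | [a] => simp
    | a :: b :: t =>
      simp only [List.length_cons]
      constructor
      · omega
      · intro h
        have hab : a = b := h a (by simp) b (by simp)
        have hne : a ≠ b := fun he => (List.nodup_cons.mp hnd).1 (he ▸ List.mem_cons_self)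
        exact absurd hab hne
  rw [key _ (PySem.Set.nodup_ofList l)]
  constructor
  · intro h x hx y hy
    exact h x ((PySem.Set.mem_ofList l x).mpr hx) y ((PySem.Set.mem_ofList l y).mpr hy)
  · intro h x hx y hy
    exact h x ((PySem.Set.mem_ofList l x).mp hx) y ((PySem.Set.mem_ofList l y).mp hy)

-- ===== VERDICT (by name: the statement is the Claim_ definition above) =====
-- helper: membership of the label list that B builds
lemma pv_memL (deg comp : List Int) (x : Int) :
    x ∈ ((PySem.List.pyRange 0 7 1).filter
        (fun i => decide (0 < PySem.List.pyGetD deg i 0))).map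
          (fun i => PySem.List.pyGetD comp i 0) ↔
      ∃ i : Int, (0 ≤ i ∧ i < 7) ∧ 0 < PySem.List.pyGetD deg i 0 ∧
        x = PySem.List.pyGetD comp i 0 := by
  simp only [List.mem_map, List.mem_filter, PySem.List.mem_pyRange_one, decide_eq_true_eq]
  constructor
  · rintro ⟨i, ⟨hi, hpos⟩, rfl⟩
    exact ⟨i, hi, hpos, rfl⟩
  · rintro ⟨i, hi, hpos, rfl⟩
    exact ⟨i, ⟨hi, hpos⟩, rfl⟩

theorem can_chain_spec : Claim_equal_can_chain := by
  unfold Claim_equal_can_chain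
  intro ds _
  unfold Spec_can_chain
  have hWF := pv_wf_edges ds
  obtain ⟨hdl, hdn⟩ := pv_deg_inv (pvEdges ds) hWF
  obtain ⟨hcl, hck⟩ := pv_comp_spec (pvEdges ds) hWF
  simp only [can_chain, can_chain_alt, pv_foldA, pv_foldB]
  have hodd : ((pvDeg (pvEdges ds)).map (fun d => if PySem.Int.mod d 2 = 1 then (1 : Int) else 0)).sum
      = ((pvDeg (pvEdges ds)).map (fun d => PySem.Int.mod d 2)).sum := by
    refine congrArg List.sum (List.map_congr_left ?_)
    intro d _
    have h1 : 0 ≤ PySem.Int.mod d 2 := PySem.Int.mod_nonneg d (by norm_num)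
    have h2 : PySem.Int.mod d 2 < 2 := PySem.Int.mod_lt d (by norm_num)
    by_cases h : PySem.Int.mod d 2 = 1
    · rw [if_pos h, h]
    · rw [if_neg h]; omega
  rw [hodd]
  cases hfind : (PySem.List.pyRange 0 7 1).find?
      (fun i => decide (0 < PySem.List.pyGetD (pvDeg (pvEdges ds)) i 0)) with
  | none =>
    dsimp only
    have hz : ∀ i : Int, 0 ≤ i → i < 7 → PySem.List.pyGetD (pvDeg (pvEdges ds)) i 0 = 0 := by
      intro i h0 h7
      have hni := List.find?_eq_none.mp hfind i (PySem.List.mem_pyRange_one.mpr ⟨h0, h7⟩)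
      simp only [decide_eq_true_eq] at hni
      rw [PySem.List.pyGetD_eq_getElem _ _ h0 (by rw [hdl]; exact_mod_cast h7)] at hni ⊢
      have hlt : i.toNat < (pvDeg (pvEdges ds)).length := by rw [hdl]; omega
      have := hdn _ (List.getElem_mem hlt)
      omega
    have hz' : ∀ d ∈ pvDeg (pvEdges ds), d = 0 := by
      intro d hd
      obtain ⟨k, hk, hdk⟩ := List.getElem_of_mem hd
      have h7 : (k : Int) < 7 := by rw [hdl] at hk; exact_mod_cast hk
      have := hz (k : Int) (by positivity) h7
      rw [PySem.List.pyGetD_eq_getElem _ _ (by positivity)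
        (by rw [hdl]; exact_mod_cast h7)] at this
      rw [← hdk]
      simpa using this
    rw [PySem.List.foldl_ite_eq_foldl_filter]
    have hfilter : (PySem.List.pyRange 0 7 1).filter
        (fun i => decide (0 < PySem.List.pyGetD (pvDeg (pvEdges ds)) i 0)) = [] := by
      rw [List.filter_eq_nil_iff]
      intro i hi
      obtain ⟨h0, h7⟩ := PySem.List.mem_pyRange_one.mp hi
      simp [hz i h0 h7]
    rw [hfilter]
    have hmod : (pvDeg (pvEdges ds)).map (fun d => PySem.Int.mod d 2)
        = (pvDeg (pvEdges ds)).map (fun _ => (0 : Int)) :=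
      List.map_congr_left (fun d hd => by rw [hz' d hd]; decide)
    rw [hmod]
    simp
  | some start =>
    dsimp only
    have hp := List.find?_some hfind
    have hmem := List.mem_of_find?_eq_some hfind
    obtain ⟨hs0, hs7⟩ := PySem.List.mem_pyRange_one.mp hmem
    simp only [decide_eq_true_eq] at hp
    have hchar := pv_bfs_char (pvEdges ds) hWF start hs0 hs7
    have hFlen : (can_chain_bfs (pvAdj (pvEdges ds))
        (PySem.List.pySetD (PySem.List.pyRepeat [false] 7) start true) [start]).length = 7 := by
      rw [pv_bfs_len]
      rw [PySem.List.pySetD_of_nonneg _ _ hs0]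
      simp [PySem.List.pyRepeat_singleton]
    have hvisF : ∀ i : Int, 0 ≤ i → i < 7 →
        (PySem.List.pyGetD (can_chain_bfs (pvAdj (pvEdges ds))
          (PySem.List.pySetD (PySem.List.pyRepeat [false] 7) start true) [start]) i false = true
          ↔ pvG (pvEdges ds) start i) := by
      intro i h0 h7
      rw [← hchar i]
      unfold pvVis
      constructor
      · intro h
        exact ⟨h0, by rw [hFlen]; exact_mod_cast h7, h⟩
      · exact fun h => h.2.2
    rw [PySem.List.foldl_ite_eq_foldl_filter, ← PySem.Set.update_map_eq_foldl_add,
      PySem.Set.update_empty]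
    have hkey : (∀ x ∈ ((PySem.List.pyRange 0 7 1).filter
          (fun i => decide (0 < PySem.List.pyGetD (pvDeg (pvEdges ds)) i 0))).map
            (fun i => PySem.List.pyGetD (pvComp (pvEdges ds)) i 0),
        ∀ y ∈ ((PySem.List.pyRange 0 7 1).filter
          (fun i => decide (0 < PySem.List.pyGetD (pvDeg (pvEdges ds)) i 0))).map
            (fun i => PySem.List.pyGetD (pvComp (pvEdges ds)) i 0), x = y) ↔
        (∀ i : Int, 0 ≤ i → i < 7 → 0 < PySem.List.pyGetD (pvDeg (pvEdges ds)) i 0 →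
          pvG (pvEdges ds) start i) := by
      constructor
      · intro h i h0 h7 hpos
        have hxL := (pv_memL _ _ (PySem.List.pyGetD (pvComp (pvEdges ds)) i 0)).mpr
          ⟨i, ⟨h0, h7⟩, hpos, rfl⟩
        have hsL := (pv_memL _ _ (PySem.List.pyGetD (pvComp (pvEdges ds)) start 0)).mpr
          ⟨start, ⟨hs0, hs7⟩, hp, rfl⟩
        have heq := h _ hxL _ hsL
        exact pvE_symm ((hck i start h0 h7 hs0 hs7).mp heq)
      · intro h x hx y hy
        obtain ⟨i, ⟨hi0, hi7⟩, hipos, rfl⟩ := (pv_memL _ _ x).mp hx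
        obtain ⟨j, ⟨hj0, hj7⟩, hjpos, rfl⟩ := (pv_memL _ _ y).mp hy
        exact (hck i j hi0 hi7 hj0 hj7).mpr
          (pvE_trans (pvE_symm (h i hi0 hi7 hipos)) (h j hj0 hj7 hjpos))
    cases hany : (PySem.List.pyRange 0 7 1).any (fun i =>
        decide (0 < PySem.List.pyGetD (pvDeg (pvEdges ds)) i 0) &&
          !(PySem.List.pyGetD (can_chain_bfs (pvAdj (pvEdges ds))
            (PySem.List.pySetD (PySem.List.pyRepeat [false] 7) start true) [start]) i false)) with
    | true =>
      rw [if_pos rfl]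
      rw [List.any_eq_true] at hany
      obtain ⟨i, hi, hib⟩ := hany
      obtain ⟨h0, h7⟩ := PySem.List.mem_pyRange_one.mp hi
      simp only [Bool.and_eq_true, decide_eq_true_eq, Bool.not_eq_true'] at hib
      have hnG : ¬ pvG (pvEdges ds) start i := by
        intro hG
        have := (hvisF i h0 h7).mpr hG
        rw [hib.2] at this
        cases this
      have hne : ¬ (∀ x ∈ ((PySem.List.pyRange 0 7 1).filter
            (fun i => decide (0 < PySem.List.pyGetD (pvDeg (pvEdges ds)) i 0))).map
              (fun i => PySem.List.pyGetD (pvComp (pvEdges ds)) i 0),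
          ∀ y ∈ ((PySem.List.pyRange 0 7 1).filter
            (fun i => decide (0 < PySem.List.pyGetD (pvDeg (pvEdges ds)) i 0))).map
              (fun i => PySem.List.pyGetD (pvComp (pvEdges ds)) i 0), x = y) :=
        fun hall => hnG (hkey.mp hall i h0 h7 hib.1)
      have hgt : ¬ ((PySem.Set.ofList (((PySem.List.pyRange 0 7 1).filter
            (fun i => decide (0 < PySem.List.pyGetD (pvDeg (pvEdges ds)) i 0))).map
              (fun i => PySem.List.pyGetD (pvComp (pvEdges ds)) i 0))).length ≤ 1) :=
        fun hle => hne ((pv_set_card_le_one _).mp hle)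
      simp [hgt]
    | false =>
      rw [if_neg (by simp)]
      rw [List.any_eq_false] at hany
      have hall : ∀ i : Int, 0 ≤ i → i < 7 →
          0 < PySem.List.pyGetD (pvDeg (pvEdges ds)) i 0 → pvG (pvEdges ds) start i := by
        intro i h0 h7 hpos
        have := hany i (PySem.List.mem_pyRange_one.mpr ⟨h0, h7⟩)
        simp only [Bool.and_eq_true, decide_eq_true_eq, Bool.not_eq_true', not_and] at this
        have hvt := this hpos
        refine (hvisF i h0 h7).mp ?_
        cases hv : PySem.List.pyGetD (can_chain_bfs (pvAdj (pvEdges ds))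
            (PySem.List.pySetD (PySem.List.pyRepeat [false] 7) start true) [start]) i false
        · exact absurd hv hvt
        · rfl
      have hle : (PySem.Set.ofList (((PySem.List.pyRange 0 7 1).filter
            (fun i => decide (0 < PySem.List.pyGetD (pvDeg (pvEdges ds)) i 0))).map
              (fun i => PySem.List.pyGetD (pvComp (pvEdges ds)) i 0))).length ≤ 1 :=
        (pv_set_card_le_one _).mpr (hkey.mpr hall)
      simp [hle]
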